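-- pv_equiv track=rewrite | github.com/project-Naga/cs202 | LAB9/Part1/analysis.py | calculate_fan_in_out
-- ===== SOURCE A (Python) =====
-- from collections import defaultdict
--
-- def calculate_fan_in_out(data):
--     fan_in = defaultdict(int)
--     fan_out = {}
--
--     for module, info in data.items():
--         # Fan-out: Count of unique imports (excluding self)
--         imports = set(info.get("imports", [])) - {module}
--         fan_out[module] = len(imports)
--
--         # Fan-in: For each import, increment that module's fan-in count
--         for imported_module in imports:
--             fan_in[imported_module] += 1
--
--     # Fill in fan-in = 0 for modules with no incoming edges
--     all_modules = set(data.keys())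
--     for mod in all_modules:
--         fan_in.setdefault(mod, 0)
--
--     # Combine fan-in and fan-out in one dictionary
--     results = {}
--     for mod in all_modules:
--         results[mod] = {
--             "fan_in": fan_in[mod],
--             "fan_out": fan_out.get(mod, 0)
--         }
--
--     return results
-- ===== SOURCE B (Python) =====
-- def calculate_fan_in_out(data):
--     # Backward gather: precompute each module's cleaned import set once,
--     # then count fan-in by scanning who imports each module.
--     cleaned = {mod: set(info.get("imports", [])) - {mod} for mod, info in data.items()}
--     return {mod: {"fan_in": sum(1 for src in data if mod in cleaned[src]),
--                   "fan_out": len(cleaned[mod])}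
--             for mod in data}
-- ===== Notes on version B (the rewrite author's own statement) =====
-- stated objective: alternative
-- what changed: Replaces A's forward-scatter defaultdict accumulator plus zero-backfill and combine loops by one precomputed cleaned-import-set table and a backward gather that counts, for each module, how many modules import it; the result is built in a single comprehension.
import Mathlib
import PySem

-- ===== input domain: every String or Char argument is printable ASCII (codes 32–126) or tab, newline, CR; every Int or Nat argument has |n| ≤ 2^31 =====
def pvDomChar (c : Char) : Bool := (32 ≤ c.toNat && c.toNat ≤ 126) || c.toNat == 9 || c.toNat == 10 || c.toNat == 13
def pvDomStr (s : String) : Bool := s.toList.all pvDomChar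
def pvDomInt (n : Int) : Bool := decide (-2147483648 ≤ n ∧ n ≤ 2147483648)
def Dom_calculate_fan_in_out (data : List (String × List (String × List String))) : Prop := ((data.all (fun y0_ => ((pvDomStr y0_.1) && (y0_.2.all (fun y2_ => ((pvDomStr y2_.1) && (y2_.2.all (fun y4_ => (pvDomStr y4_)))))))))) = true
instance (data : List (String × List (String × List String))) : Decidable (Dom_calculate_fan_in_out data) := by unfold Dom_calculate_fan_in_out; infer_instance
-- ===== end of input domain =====

-- B replaces A's forward-scatter fan-in accumulator (defaultdict + zero backfill + combine loop)
-- by a precomputed cleaned-import table and a backward gather; objective: alternative decomposition.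

-- shared helper: 'set(info.get("imports", [])) - {module}', an expression both Pythons contain verbatim
def cleanOf (p : String × List (String × List String)) : List String :=
  PySem.Set.diff (PySem.Set.ofList ((PySem.Dict.mk p.2).getD "imports" [])) [p.1]

-- ===== PORT A =====
def calculate_fan_in_out (data : List (String × List (String × List String))) : List (String × List (String × Int)) :=
  let st := data.foldl (fun (st : PySem.Dict String Int × PySem.Dict String Int) p =>
    ((cleanOf p).foldl (fun d m => d.modify m 0 (· + 1)) st.1,
     st.2.insert p.1 ((cleanOf p).length : Int))) (PySem.Dict.empty, PySem.Dict.empty)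
  let all_modules := PySem.Set.ofList (data.map Prod.fst)
  let fan_in := all_modules.foldl (fun d m => d.setdefault m 0) st.1
  let results := all_modules.foldl (fun r mod =>
    r.insert mod [(("fan_in" : String), fan_in.getD mod 0), (("fan_out" : String), st.2.getD mod 0)])
    (PySem.Dict.empty : PySem.Dict String (List (String × Int)))
  results.items

-- ===== PORT B =====
def calculate_fan_in_out_alt (data : List (String × List (String × List String))) : List (String × List (String × Int)) :=
  let cleaned : PySem.Dict String (List String) := PySem.Dict.ofList (data.map (fun p => (p.1, cleanOf p)))
  data.map (fun p =>
    (p.1, [(("fan_in" : String),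
            (data.map Prod.fst).foldl (fun acc src => if PySem.Set.contains (cleaned.getD src []) p.1 then acc + 1 else acc) (0 : Int)),
           (("fan_out" : String), ((cleaned.getD p.1 []).length : Int))]))

-- ===== PRECONDITION & SPEC =====
-- Pre_ excludes association lists with duplicate module keys: they do not represent a Python dict
-- (A's argument is a dict, whose keys are necessarily distinct), so no Python input is excluded.
def Pre_calculate_fan_in_out (data : List (String × List (String × List String))) : Prop :=
  (data.map Prod.fst).Nodup
instance (data : List (String × List (String × List String))) : Decidable (Pre_calculate_fan_in_out data) := by unfold Pre_calculate_fan_in_out; infer_instance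

def pvWitness_calculate_fan_in_out : (List (String × List (String × List String))) :=
  [("a", [("imports", ["b", "a", "b"])]), ("b", [("doc", ["x"])])]

def Spec_calculate_fan_in_out (data : List (String × List (String × List String))) (out : List (String × List (String × Int))) : Prop := out = calculate_fan_in_out_alt data
instance (data : List (String × List (String × List String))) (out : List (String × List (String × Int))) : Decidable (Spec_calculate_fan_in_out data out) := by unfold Spec_calculate_fan_in_out; infer_instance

-- ===== CLAIM (what is proved, stated in full; the proofs are below) =====
def Claim_equal_calculate_fan_in_out : Prop := ∀ (data : List (String × List (String × List String))), Dom_calculate_fan_in_out data → Pre_calculate_fan_in_out data → Spec_calculate_fan_in_out data (calculate_fan_in_out data)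

-- ===== LEMMAS AND PROOFS =====

theorem pair_fold_split (data : List (String × List (String × List String)))
    (d1 d2 : PySem.Dict String Int) :
    data.foldl (fun (st : PySem.Dict String Int × PySem.Dict String Int) p =>
      ((cleanOf p).foldl (fun d m => d.modify m 0 (· + 1)) st.1,
       st.2.insert p.1 ((cleanOf p).length : Int))) (d1, d2)
    = (data.foldl (fun d p => (cleanOf p).foldl (fun d m => d.modify m 0 (· + 1)) d) d1,
       data.foldl (fun d p => d.insert p.1 ((cleanOf p).length : Int)) d2) := by
  induction data generalizing d1 d2 with
  | nil => rfl
  | cons p rest ih => simp only [List.foldl_cons, ih]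

theorem fanin_fold_getD (mod : String) (data : List (String × List (String × List String)))
    (d : PySem.Dict String Int) :
    (data.foldl (fun d p => (cleanOf p).foldl (fun d m => d.modify m 0 (· + 1)) d) d).getD mod 0
    = d.getD mod 0 + (data.map (fun p => (((cleanOf p).count mod : Int)))).sum := by
  induction data generalizing d with
  | nil => simp
  | cons p rest ih =>
    simp only [List.foldl_cons, List.map_cons, List.sum_cons, ih,
      PySem.Dict.getD_foldl_modify_add_one]
    ring

theorem setdefault_fold_getD (mod : String) (l : List String) (d : PySem.Dict String Int) :
    (l.foldl (fun d m => d.setdefault m 0) d).getD mod 0 = d.getD mod 0 := by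
  induction l generalizing d with
  | nil => rfl
  | cons m rest ih =>
    simp only [List.foldl_cons, ih]
    by_cases h : mod = m
    · subst h; exact PySem.Dict.getD_setdefault_self d mod 0 0
    · rw [PySem.Dict.getD_eq_get?_getD, PySem.Dict.get?_setdefault_of_ne d 0 h,
        ← PySem.Dict.getD_eq_get?_getD]

theorem fanout_fold_getD (mod : String) (data : List (String × List (String × List String)))
    (d : PySem.Dict String Int) (d2 : PySem.Dict String (List String))
    (h : d.getD mod 0 = ((d2.getD mod []).length : Int)) :
    (data.foldl (fun d p => d.insert p.1 ((cleanOf p).length : Int)) d).getD mod 0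
    = (((data.foldl (fun d p => d.insert p.1 (cleanOf p)) d2).getD mod []).length : Int) := by
  induction data generalizing d d2 with
  | nil => exact h
  | cons p rest ih =>
    simp only [List.foldl_cons]
    apply ih
    rw [PySem.Dict.getD_insert, PySem.Dict.getD_insert]
    by_cases hk : mod = p.1 <;> simp [hk, h]

theorem cleaned_getD (data : List (String × List (String × List String)))
    (hnd : (data.map Prod.fst).Nodup) (q : String × List (String × List String)) (hq : q ∈ data) :
    (PySem.Dict.ofList (data.map (fun p => (p.1, cleanOf p)))).getD q.1 [] = cleanOf q := by
  have hitems : (PySem.Dict.ofList (data.map (fun p => (p.1, cleanOf p)))).items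
      = data.map (fun p => (p.1, cleanOf p)) := by
    have := PySem.Dict.items_foldl_insert_fresh data (fun p => p.1) (fun p => cleanOf p)
      PySem.Dict.empty (fun a _ => rfl) hnd
    rw [show (PySem.Dict.ofList (data.map (fun p => (p.1, cleanOf p))))
        = data.foldl (fun d p => d.insert p.1 (cleanOf p)) PySem.Dict.empty from by
          show (data.map (fun p => (p.1, cleanOf p))).foldl _ _ = _
          rw [List.foldl_map]]
    simpa using this
  have hmem : (q.1, cleanOf q) ∈ (PySem.Dict.ofList (data.map (fun p => (p.1, cleanOf p)))).items := by
    rw [hitems]; exact List.mem_map_of_mem hq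
  exact PySem.Dict.getD_of_mem_items _ hmem (PySem.Dict.nodup_keys_ofList _) []

theorem count_clean_eq_ite (mod : String) (q : String × List (String × List String)) :
    (((cleanOf q).count mod : Int)) = if PySem.Set.contains (cleanOf q) mod then 1 else 0 := by
  have hnd : (cleanOf q).Nodup := PySem.Set.nodup_diff _ _ (PySem.Set.nodup_ofList _)
  by_cases hm : mod ∈ cleanOf q
  · simp [List.count_eq_one_of_mem hnd hm, hm]
  · have : PySem.Set.contains (cleanOf q) mod = false := by
      by_contra h
      exact hm ((PySem.Set.contains_iff _ _).1 (by simpa using h))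
    simp [List.count_eq_zero_of_not_mem hm, hm]

theorem ite_push_add (b : Bool) (acc : Int) :
    (if b = true then acc + 1 else acc) = acc + (if b = true then (1 : Int) else 0) := by
  cases b <;> simp

theorem calculate_fan_in_out_spec : Claim_equal_calculate_fan_in_out := by
  intro data _ hnd
  unfold Spec_calculate_fan_in_out
  unfold calculate_fan_in_out calculate_fan_in_out_alt
  rw [pair_fold_split]
  have hks : PySem.Set.ofList (data.map Prod.fst) = data.map Prod.fst :=
    PySem.Set.ofList_eq_self_of_nodup _ hnd
  rw [hks]
  -- turn A's result-dict fold into a plain map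
  rw [PySem.Dict.items_foldl_insert_fresh (data.map Prod.fst) (fun m => m) _
    PySem.Dict.empty (fun a _ => rfl) (by simpa using hnd)]
  rw [show (PySem.Dict.empty : PySem.Dict String (List (String × Int))).items = [] from rfl,
    List.nil_append]
  dsimp only
  rw [List.map_map]
  apply List.map_congr_left
  intro q hq
  simp only [Function.comp]
  refine Prod.ext rfl ?_
  have hclean : ∀ r ∈ data,
      (PySem.Dict.ofList (data.map (fun p => (p.1, cleanOf p)))).getD r.1 [] = cleanOf r :=
    fun r hr => cleaned_getD data hnd r hr
  -- fan_out component
  have hfo : (data.foldl (fun d p => d.insert p.1 ((cleanOf p).length : Int)) PySem.Dict.empty).getD q.1 0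
      = (((PySem.Dict.ofList (data.map (fun p => (p.1, cleanOf p)))).getD q.1 []).length : Int) := by
    rw [hclean q hq]
    have hol : data.foldl (fun d p => d.insert p.1 (cleanOf p)) PySem.Dict.empty
        = PySem.Dict.ofList (data.map (fun p => (p.1, cleanOf p))) := by
      show _ = (data.map (fun p => (p.1, cleanOf p))).foldl _ _
      rw [List.foldl_map]
    rw [fanout_fold_getD q.1 data PySem.Dict.empty PySem.Dict.empty (by rfl), hol, hclean q hq]
  -- fan_in component
  have hfi :
      (((data.map Prod.fst).foldl (fun d m => d.setdefault m 0)
          (data.foldl (fun d p => (cleanOf p).foldl (fun d m => d.modify m 0 (· + 1)) d)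
            (PySem.Dict.empty : PySem.Dict String Int))).getD q.1 0)
      = (data.map Prod.fst).foldl (fun acc src =>
          if PySem.Set.contains ((PySem.Dict.ofList (data.map (fun p => (p.1, cleanOf p)))).getD src []) q.1
          then acc + 1 else acc) (0 : Int) := by
    rw [setdefault_fold_getD, fanin_fold_getD]
    rw [List.foldl_map]
    rw [PySem.List.foldl_congr_mem' data _
      (fun acc r => acc + if PySem.Set.contains (cleanOf r) q.1 then 1 else 0) 0
      (fun r hr acc => by rw [hclean r hr, ite_push_add])]
    rw [PySem.List.foldl_add]
    simp only [PySem.Dict.getD_empty, zero_add]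
    congr 1
    apply List.map_congr_left
    intro r _
    exact count_clean_eq_ite q.1 r
  rw [hfo, hfi]
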